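-- pv_equiv track=rewrite | github.com/xiao0516bai/EA-MNE | mooseeker/fit_funcs/get_network_totalReactions.py | generate_enzyme_combinations
-- ===== SOURCE A (Python) =====
-- def generate_enzyme_combinations(reactions_list,rxn_dict, current_combination=[], index=0, result=[]):
--     if index == len(reactions_list):
--         if current_combination:
--             result.append(current_combination.copy())
--         return
--     reaction = reactions_list[index]
--     enzymes = rxn_dict[reaction]['enzyme']
--     if enzymes is not None:
--         for enzyme in enzymes:
--             current_combination.append(enzyme)
--             generate_enzyme_combinations(reactions_list,rxn_dict, current_combination, index + 1, result)
--             current_combination.pop()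
--     else:
--         generate_enzyme_combinations(reactions_list, rxn_dict, current_combination, index + 1, result)
--     return result
-- ===== SOURCE B (Python) =====
-- import itertools
--
-- def generate_enzyme_combinations(reactions_list, rxn_dict, current_combination=[], index=0, result=[]):
--     enzyme_lists = []
--     i = index
--     while i != len(reactions_list):
--         enzymes = rxn_dict[reactions_list[i]]['enzyme']
--         if enzymes is not None:
--             if not enzymes:
--                 # an empty enzyme set admits no combination at all
--                 return result
--             enzyme_lists.append(enzymes)
--         i += 1
--     for combo in itertools.product(*enzyme_lists):
--         full = current_combination + list(combo)
--         if full: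
--             result.append(full)
--     return result
-- ===== Notes on version B (the rewrite author's own statement) =====
-- stated objective: idiomatic
-- what changed: The recursive backtracking with a mutated current_combination is replaced by an iterative two-phase build: scan the suffix once collecting the non-None enzyme lists (returning early on an empty one, since it admits no combination), then enumerate their Cartesian product with itertools.product and append each non-empty prefixed combination.
-- outside the precondition, e.g. on generate_enzyme_combinations(['r1'], {'r1': {'enzyme': ['e']}}, [], 1, []): A returns None, B returns []; on generate_enzyme_combinations(['r1'], {}, [], 0, []): A raises KeyError, B raises KeyError
import Mathlib
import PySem

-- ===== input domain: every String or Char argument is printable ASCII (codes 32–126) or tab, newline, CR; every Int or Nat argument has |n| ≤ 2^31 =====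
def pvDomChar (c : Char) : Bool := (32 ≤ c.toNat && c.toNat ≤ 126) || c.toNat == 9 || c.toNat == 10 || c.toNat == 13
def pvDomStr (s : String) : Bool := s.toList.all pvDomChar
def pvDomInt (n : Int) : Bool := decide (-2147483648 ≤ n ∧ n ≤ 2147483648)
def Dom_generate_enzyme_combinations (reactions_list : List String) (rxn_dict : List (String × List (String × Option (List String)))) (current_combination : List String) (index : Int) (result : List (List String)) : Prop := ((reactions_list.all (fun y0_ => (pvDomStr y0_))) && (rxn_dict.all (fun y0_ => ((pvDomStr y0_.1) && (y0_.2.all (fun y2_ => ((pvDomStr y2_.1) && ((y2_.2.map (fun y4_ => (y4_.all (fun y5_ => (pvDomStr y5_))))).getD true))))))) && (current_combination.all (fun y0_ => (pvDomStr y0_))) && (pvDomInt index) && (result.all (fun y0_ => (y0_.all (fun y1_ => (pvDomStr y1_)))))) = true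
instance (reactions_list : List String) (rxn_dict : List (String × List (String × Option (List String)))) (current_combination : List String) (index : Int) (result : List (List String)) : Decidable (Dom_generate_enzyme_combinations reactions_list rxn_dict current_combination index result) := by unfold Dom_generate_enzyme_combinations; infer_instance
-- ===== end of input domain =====

-- B replaces A's recursive backtracking by a single scan collecting the suffix's non-None enzyme
-- lists (returning early on an empty one) followed by an enumeration of their Cartesian product
-- (idiomatic, same cost); equivalence is about the RETURN value (both Pythons append the produced
-- combinations to the shared `result` list in the same order).


-- shared primitive: Python's `rxn_dict[r]['enzyme']` (first-match dict lookup; none = KeyError)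
def pvEnz? (rxn_dict : List (String × List (String × Option (List String)))) (r : String) : Option (Option (List String)) :=
  match PySem.Dict.get? (PySem.Dict.mk rxn_dict) r with
  | none => none
  | some row => PySem.Dict.get? (PySem.Dict.mk row) "enzyme"

-- ===== PORT A =====
-- A's recursion, with fuel ≥ len - index + 1 (A raises / falls outside Pre_ when fuel would run out)
def genA (rl : List String) (rd : List (String × List (String × Option (List String)))) : Nat → List String → Int → List (List String) → List (List String)
  | 0, _, _, res => res
  | fuel + 1, cur, index, res =>
    if index = (rl.length : Int) then
      (if cur ≠ [] then res ++ [cur] else res)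
    else
      match PySem.List.pyGet? rl index with
      | none => res   -- IndexError, outside Pre_
      | some reaction =>
        match pvEnz? rd reaction with
        | none => res -- KeyError, outside Pre_
        | some (some enzymes) =>
            enzymes.foldl (fun acc enzyme => genA rl rd fuel (cur ++ [enzyme]) (index + 1) acc) res
        | some none => genA rl rd fuel cur (index + 1) res

def generate_enzyme_combinations (reactions_list : List String) (rxn_dict : List (String × List (String × Option (List String)))) (current_combination : List String) (index : Int) (result : List (List String)) : List (List String) :=
  genA reactions_list rxn_dict (((reactions_list.length : Int) - index).toNat + 1) current_combination index result

-- ===== PORT B =====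
-- B's while loop: collect the non-None enzyme lists from position i up to len (fuel ≥ len - i + 1);
-- `none` = B hit an empty enzyme list and returns `result` at once
def collectB (rl : List String) (rd : List (String × List (String × Option (List String)))) : Nat → Int → List (List String) → Option (List (List String))
  | 0, _, acc => some acc
  | fuel + 1, i, acc =>
    if i = (rl.length : Int) then some acc
    else
      match PySem.List.pyGet? rl i with
      | none => some acc   -- IndexError, outside Pre_
      | some r =>
        match pvEnz? rd r with
        | none => some acc -- KeyError, outside Pre_
        | some (some []) => none          -- `if not enzymes: return result`
        | some (some enzymes) => collectB rl rd fuel (i + 1) (acc ++ [enzymes])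
        | some none => collectB rl rd fuel (i + 1) acc

-- itertools.product(*lists) in B's iteration order
def prodLists : List (List String) → List (List String)
  | [] => [[]]
  | l :: ls => l.flatMap (fun e => (prodLists ls).map (fun c => e :: c))

def generate_enzyme_combinations_alt (reactions_list : List String) (rxn_dict : List (String × List (String × Option (List String)))) (current_combination : List String) (index : Int) (result : List (List String)) : List (List String) :=
  match collectB reactions_list rxn_dict (((reactions_list.length : Int) - index).toNat + 1) index [] with
  | none => result
  | some ls =>
    (prodLists ls).foldl
      (fun acc combo => if current_combination ++ combo ≠ [] then acc ++ [current_combination ++ combo] else acc)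
      result

-- ===== PRECONDITION & SPEC =====
-- Pre_ excludes exactly the inputs on which A does not return a list: index = len(reactions_list)
-- (A returns None), index outside [-len, len) (IndexError), and a missing reaction or 'enzyme' key
-- at a position of the suffix not shielded by an earlier empty enzyme list (KeyError).
def Pre_generate_enzyme_combinations (reactions_list : List String) (rxn_dict : List (String × List (String × Option (List String)))) (current_combination : List String) (index : Int) (result : List (List String)) : Prop :=
  -(reactions_list.length : Int) ≤ index ∧
  index < (reactions_list.length : Int) ∧
  ∀ i ∈ PySem.List.pyRange index (reactions_list.length : Int) 1,
    ((PySem.List.pyGet? reactions_list i).bind (pvEnz? rxn_dict)).isSome = true ∨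
    ∃ j ∈ PySem.List.pyRange index (reactions_list.length : Int) 1,
      j < i ∧ (PySem.List.pyGet? reactions_list j).bind (pvEnz? rxn_dict) = some (some [])
instance (reactions_list : List String) (rxn_dict : List (String × List (String × Option (List String)))) (current_combination : List String) (index : Int) (result : List (List String)) : Decidable (Pre_generate_enzyme_combinations reactions_list rxn_dict current_combination index result) := by unfold Pre_generate_enzyme_combinations; infer_instance

def pvWitness_generate_enzyme_combinations : List String × (List (String × List (String × Option (List String)))) × List String × Int × List (List String) :=
  (["r1", "r2"], [("r1", [("enzyme", some ["e1", "e2"])]), ("r2", [("enzyme", none)])], [], 0, [])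

def Spec_generate_enzyme_combinations (reactions_list : List String) (rxn_dict : List (String × List (String × Option (List String)))) (current_combination : List String) (index : Int) (result : List (List String)) (out : List (List String)) : Prop := out = generate_enzyme_combinations_alt reactions_list rxn_dict current_combination index result
instance (reactions_list : List String) (rxn_dict : List (String × List (String × Option (List String)))) (current_combination : List String) (index : Int) (result : List (List String)) (out : List (List String)) : Decidable (Spec_generate_enzyme_combinations reactions_list rxn_dict current_combination index result out) := by unfold Spec_generate_enzyme_combinations; infer_instance

-- ===== CLAIM (what is proved, stated in full; the proofs are below) =====
def Claim_equal_generate_enzyme_combinations : Prop := ∀ (reactions_list : List String) (rxn_dict : List (String × List (String × Option (List String)))) (current_combination : List String) (index : Int) (result : List (List String)), Dom_generate_enzyme_combinations reactions_list rxn_dict current_combination index result → Pre_generate_enzyme_combinations reactions_list rxn_dict current_combination index result → Spec_generate_enzyme_combinations reactions_list rxn_dict current_combination index result (generate_enzyme_combinations reactions_list rxn_dict current_combination index result)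

-- ===== LEMMAS AND PROOFS =====
-- B's collector from any accumulator, in terms of the empty accumulator
lemma collectB_map (rl : List String) (rd : List (String × List (String × Option (List String)))) :
    ∀ (fuel : Nat) (i : Int) (acc : List (List String)),
      collectB rl rd fuel i acc = (collectB rl rd fuel i []).map (acc ++ ·) := by
  intro fuel
  induction fuel with
  | zero => intro i acc; simp [collectB]
  | succ fuel ih =>
    intro i acc
    by_cases hi : i = (rl.length : Int)
    · simp [collectB, hi]
    · rcases hg : PySem.List.pyGet? rl i with _ | r
      · simp [collectB, hi, hg]
      · rcases he : pvEnz? rd r with _ | (_ | (_ | ⟨e, es⟩))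
        · simp [collectB, hi, hg, he]
        · have h1 : collectB rl rd (fuel+1) i acc = collectB rl rd fuel (i+1) acc := by
            simp [collectB, hi, hg, he]
          have h2 : collectB rl rd (fuel+1) i [] = collectB rl rd fuel (i+1) [] := by
            simp [collectB, hi, hg, he]
          rw [h1, h2, ih (i+1) acc]
        · simp [collectB, hi, hg, he]
        · have h1 : collectB rl rd (fuel+1) i acc = collectB rl rd fuel (i+1) (acc ++ [e :: es]) := by
            simp [collectB, hi, hg, he]
          have h2 : collectB rl rd (fuel+1) i [] = collectB rl rd fuel (i+1) [e :: es] := by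
            simp [collectB, hi, hg, he]
          rw [h1, h2, ih (i+1) (acc ++ [e :: es]), ih (i+1) [e :: es]]
          cases collectB rl rd fuel (i+1) [] <;> simp

lemma foldl_fixed {α β : Type} (res : α) (xs : List β) :
    xs.foldl (fun a _ => a) res = res := by
  induction xs generalizing res with
  | nil => rfl
  | cons x xs ih => exact ih res

-- the core invariant: A's recursion computes B's collect-then-product from any accumulator
lemma genA_eq (rl : List String) (rd : List (String × List (String × Option (List String)))) :
    ∀ (fuel : Nat) (index : Int) (cur : List String) (res : List (List String)),
      index ≤ (rl.length : Int) →
      (rl.length : Int) - index < fuel →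
      (∀ i ∈ PySem.List.pyRange index (rl.length : Int) 1,
        ((PySem.List.pyGet? rl i).bind (pvEnz? rd)).isSome = true ∨
        ∃ j ∈ PySem.List.pyRange index (rl.length : Int) 1,
          j < i ∧ (PySem.List.pyGet? rl j).bind (pvEnz? rd) = some (some [])) →
      genA rl rd fuel cur index res =
        match collectB rl rd (((rl.length : Int) - index).toNat + 1) index [] with
        | none => res
        | some ls =>
          (prodLists ls).foldl
            (fun acc combo => if cur ++ combo ≠ [] then acc ++ [cur ++ combo] else acc) res := by
  intro fuel
  induction fuel with
  | zero => intro index cur res h1 h2 h3; omega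
  | succ fuel ih =>
    intro index cur res h1 h2 h3
    by_cases hidx : index = (rl.length : Int)
    · subst hidx
      simp [genA, collectB, prodLists]
    · have hlt : index < (rl.length : Int) := lt_of_le_of_ne h1 hidx
      have hmemself : index ∈ PySem.List.pyRange index (rl.length : Int) 1 := by
        rw [PySem.List.mem_pyRange_one]; omega
      have hhead : ((PySem.List.pyGet? rl index).bind (pvEnz? rd)).isSome = true := by
        rcases h3 index hmemself with h | ⟨j, hj, hjlt, _⟩
        · exact h
        · rw [PySem.List.mem_pyRange_one] at hj; omega
      have hfuel : ((rl.length : Int) - index).toNat + 1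
          = ((((rl.length : Int) - (index + 1)).toNat + 1) + 1) := by omega
      have htail : (PySem.List.pyGet? rl index).bind (pvEnz? rd) ≠ some (some []) →
          ∀ i ∈ PySem.List.pyRange (index + 1) (rl.length : Int) 1,
            ((PySem.List.pyGet? rl i).bind (pvEnz? rd)).isSome = true ∨
            ∃ j ∈ PySem.List.pyRange (index + 1) (rl.length : Int) 1,
              j < i ∧ (PySem.List.pyGet? rl j).bind (pvEnz? rd) = some (some []) := by
        intro hne i hi
        rw [PySem.List.mem_pyRange_one] at hi
        rcases h3 i (by rw [PySem.List.mem_pyRange_one]; omega) with h | ⟨j, hj, hjlt, hjE⟩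
        · exact Or.inl h
        · rw [PySem.List.mem_pyRange_one] at hj
          have hjne : j ≠ index := by intro h; exact hne (h ▸ hjE)
          exact Or.inr ⟨j, by rw [PySem.List.mem_pyRange_one]; omega, hjlt, hjE⟩
      rcases hg : PySem.List.pyGet? rl index with _ | r
      · rw [hg] at hhead; simp at hhead
      · rcases he : pvEnz? rd r with _ | (_ | (_ | ⟨e, es⟩))
        · rw [hg] at hhead; simp [he] at hhead
        · -- enzymes is None: A skips, B skips
          have hne : (PySem.List.pyGet? rl index).bind (pvEnz? rd) ≠ some (some []) := by
            simp [hg, he]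
          have hstepA : genA rl rd (fuel + 1) cur index res = genA rl rd fuel cur (index + 1) res := by
            simp [genA, hidx, hg, he]
          have hstepB : collectB rl rd (((rl.length : Int) - index).toNat + 1) index []
              = collectB rl rd (((rl.length : Int) - (index + 1)).toNat + 1) (index + 1) [] := by
            rw [hfuel]; simp [collectB, hidx, hg, he]
          rw [hstepA, hstepB, ← ih (index + 1) cur res (by omega) (by omega) (htail hne)]
        · -- enzymes = []: A's loop body never runs, B returns result
          have hstepB : collectB rl rd (((rl.length : Int) - index).toNat + 1) index [] = none := by
            rw [hfuel]; simp [collectB, hidx, hg, he]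
          rw [hstepB]
          simp [genA, hidx, hg, he]
        · -- enzymes nonempty
          have hne : (PySem.List.pyGet? rl index).bind (pvEnz? rd) ≠ some (some []) := by
            simp [hg, he]
          have hstepA : genA rl rd (fuel + 1) cur index res =
              (e :: es).foldl (fun acc en => genA rl rd fuel (cur ++ [en]) (index + 1) acc) res := by
            simp [genA, hidx, hg, he]
          have hstepB : collectB rl rd (((rl.length : Int) - index).toNat + 1) index []
              = (collectB rl rd (((rl.length : Int) - (index + 1)).toNat + 1) (index + 1) []).map
                  ((e :: es) :: ·) := by
            rw [hfuel]
            have : collectB rl rd (((((rl.length : Int) - (index + 1)).toNat + 1)) + 1) index []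
                = collectB rl rd (((rl.length : Int) - (index + 1)).toNat + 1) (index + 1) [e :: es] := by
              simp [collectB, hidx, hg, he]
            rw [this, collectB_map rl rd _ (index + 1) [e :: es]]
            cases collectB rl rd (((rl.length : Int) - (index + 1)).toNat + 1) (index + 1) [] <;> simp
          have hfun : (fun (acc : List (List String)) (en : String) =>
              genA rl rd fuel (cur ++ [en]) (index + 1) acc)
              = fun acc en =>
                match collectB rl rd (((rl.length : Int) - (index + 1)).toNat + 1) (index + 1) [] with
                | none => acc
                | some ls =>
                  (prodLists ls).foldl
                    (fun a combo => if (cur ++ [en]) ++ combo ≠ [] then a ++ [(cur ++ [en]) ++ combo] else a) acc := by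
            funext acc en
            exact ih (index + 1) (cur ++ [en]) acc (by omega) (by omega) (htail hne)
          rw [hstepA, hfun, hstepB]
          rcases hc : collectB rl rd (((rl.length : Int) - (index + 1)).toNat + 1) (index + 1) [] with _ | ls
          · simp only []
            exact foldl_fixed res (e :: es)
          · show _ = (prodLists ((e :: es) :: ls)).foldl _ res
            show _ = ((e :: es).flatMap fun en => (prodLists ls).map (fun c => en :: c)).foldl _ res
            rw [List.foldl_flatMap]
            congr 1
            funext acc en
            show (prodLists ls).foldl
                (fun a combo => if (cur ++ [en]) ++ combo ≠ [] then a ++ [(cur ++ [en]) ++ combo] else a) acc = _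
            rw [List.foldl_map]
            congr 1
            funext acc2 c
            simp

-- ===== VERDICT (by name: the statement is the Claim_ definition above) =====
theorem generate_enzyme_combinations_spec : Claim_equal_generate_enzyme_combinations := by
  intro rl rd cur index res _hDom hPre
  unfold Spec_generate_enzyme_combinations generate_enzyme_combinations generate_enzyme_combinations_alt
  exact genA_eq rl rd _ index cur res (le_of_lt hPre.2.1) (by omega) hPre.2.2
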